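-- pv_equiv track=rewrite | github.com/VemorPhose/Coding | test.py | mark_important
-- ===== SOURCE A (Python) =====
-- def mark_important(cur, parent, imp, tree, need_edges):
--     posb = cur in imp
--     for nxt in tree[cur]:
--         if nxt != parent:
--             if mark_important(nxt, cur, imp, tree, need_edges):
--                 need_edges.add(tuple(sorted((cur, nxt))))
--                 posb = True
--     return posb
-- ===== SOURCE B (Python) =====
-- def mark_important(cur, parent, imp, tree, need_edges):
--     # Iterative rewrite: phase 1 walks the tree with an explicit stack of
--     # (node, parent) frames in DFS preorder, recording the visit order and
--     # OR-ing importance into `found`; phase 2 replays the order backwards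
--     # (children before parents) propagating subtree flags through a dict and
--     # adding the same sorted edge tuples to need_edges as the recursive version.
--     imps = set(imp)
--     found = False
--     order = []
--     stack = [(cur, parent)]
--     while stack:
--         node, par = stack.pop()
--         order.append((node, par))
--         if node in imps:
--             found = True
--         frames = [(nxt, node) for nxt in tree[node] if nxt != par]
--         stack.extend(reversed(frames))
--     flag = {}
--     for node, par in reversed(order):
--         f = node in imps
--         for nxt in tree[node]:
--             if nxt != par and flag.get(nxt, False):
--                 f = True
--                 need_edges.add((node, nxt) if node < nxt else (nxt, node))
--         flag[node] = f
--     return found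
-- ===== Notes on version B (the rewrite author's own statement) =====
-- stated objective: alternative
-- what changed: The recursive boolean DFS is replaced by an iterative traversal: an explicit stack of (node, parent) frames collects the visit order and ORs importance into a flag, and a second reverse-order pass propagates per-subtree flags through a dict to add the same sorted edge tuples to need_edges; B also avoids Python's recursion limit on deep trees.
import Mathlib
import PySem

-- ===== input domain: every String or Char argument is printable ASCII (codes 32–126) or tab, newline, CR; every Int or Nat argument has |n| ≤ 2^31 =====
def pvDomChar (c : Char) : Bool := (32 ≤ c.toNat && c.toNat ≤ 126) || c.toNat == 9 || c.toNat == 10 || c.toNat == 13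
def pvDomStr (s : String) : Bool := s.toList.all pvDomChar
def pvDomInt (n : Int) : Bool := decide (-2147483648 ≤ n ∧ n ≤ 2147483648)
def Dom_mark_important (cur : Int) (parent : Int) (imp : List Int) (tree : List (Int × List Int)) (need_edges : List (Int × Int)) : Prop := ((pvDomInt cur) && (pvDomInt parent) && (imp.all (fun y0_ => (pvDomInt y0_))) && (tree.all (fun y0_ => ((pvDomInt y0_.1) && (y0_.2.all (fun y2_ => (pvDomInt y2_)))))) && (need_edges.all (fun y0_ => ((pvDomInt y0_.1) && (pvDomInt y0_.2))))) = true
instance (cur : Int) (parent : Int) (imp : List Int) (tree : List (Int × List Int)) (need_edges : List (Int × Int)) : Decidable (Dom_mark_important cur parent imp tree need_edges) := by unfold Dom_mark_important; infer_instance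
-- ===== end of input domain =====

-- B replaces the recursive boolean DFS by an iterative explicit-stack traversal (plus a
-- reverse-order flag pass that reproduces A's need_edges side effect). Both Pythons mutate
-- the need_edges set (identically on Pre_ inputs); the equivalence proved here is about the
-- RETURN value only (the need_edges mutation has no effect on the return and is not modelled).

-- tree[node]: both Pythons receive `tree` as a dict; lookup per the dict convention.
-- (Pre_ guarantees every looked-up node is a key, so the [] default is never returned.)
def pvNbrs (tree : List (Int × List Int)) (node : Int) : List Int :=
  (PySem.Dict.ofList tree).getD node []

-- On Pre_ inputs the number of recursive calls is at most 2 ^ (pvE tree + 2) (a call is a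
-- backtrack-free walk from the root; with no backtrack-free cycle such walks use distinct
-- frames of an acyclic frame graph with at most pvE tree + 1 frames), so this fuel is never
-- exhausted there.
def pvFuel (tree : List (Int × List Int)) : Nat :=
  2 ^ ((tree.map (fun p => p.2.length)).sum + 2)

-- ===== PORT A =====
-- Literal transliteration of A's recursion; `fuel` is a totality guard only (the Python has
-- none): each call entered consumes one unit and returns the leftover to its continuation,
-- and on Pre_ inputs the initial pvFuel tree units are never exhausted (see the pvFuel
-- comment). The dead `else` branch of `hfuel` is
-- unreachable (leftover fuel never exceeds what was passed in: goA_fuel_le below); it exists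
-- only so the termination measure (fuel, list length) decreases.
mutual
def goA (imp : List Int) (tree : List (Int × List Int)) : Nat → Int → Int → Bool × Nat
  | 0, _, _ => (false, 0)
  | f+1, cur, parent =>
      -- posb = cur in imp, then the for-loop over tree[cur]
      goAList imp tree f (pvNbrs tree cur) cur parent (decide (cur ∈ imp))
termination_by f _ _ => (f, 0)
decreasing_by exact Prod.Lex.left _ _ (by omega)
def goAList (imp : List Int) (tree : List (Int × List Int)) : Nat → List Int → Int → Int → Bool → Bool × Nat
  | f, [], _, _, posb => (posb, f)
  | f, nxt :: rest, cur, parent, posb =>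
      if nxt ≠ parent then
        let r := goA imp tree f nxt cur
        if hfuel : r.2 ≤ f then
          goAList imp tree r.2 rest cur parent (if r.1 then true else posb)
        else -- unreachable
          goAList imp tree f rest cur parent (if r.1 then true else posb)
      else
        goAList imp tree f rest cur parent posb
termination_by f lst _ _ _ => (f, lst.length + 1)
decreasing_by
  · exact Prod.Lex.right _ (by simp [List.length_cons])
  · rcases Nat.lt_or_eq_of_le hfuel with hlt | heq
    · exact Prod.Lex.left _ _ hlt
    · rw [heq]; exact Prod.Lex.right _ (by simp [List.length_cons])
  · exact Prod.Lex.right _ (by simp [List.length_cons])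
  · exact Prod.Lex.right _ (by simp [List.length_cons])
end

def mark_important (cur : Int) (parent : Int) (imp : List Int) (tree : List (Int × List Int)) (need_edges : List (Int × Int)) : Bool :=
  (goA imp tree (pvFuel tree) cur parent).1

-- ===== PORT B =====
-- Phase 1 of Source B (the while-loop over the explicit stack): the Lean list head is the top of
-- the Python stack, so `stack.extend(reversed(frames))` then `stack.pop()` is `frames ++
-- stack` then matching the head. One fuel unit per pop — the same totality guard as A's,
-- never exhausted on Pre_ inputs. Phase 2 of Source B only mutates need_edges and flag, never
-- `found`, so it contributes nothing to the returned value and is not modelled.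
def runB (imp : List Int) (tree : List (Int × List Int)) : Nat → List (Int × Int) → Bool → Bool
  | 0, _, found => found
  | _+1, [], found => found
  | f+1, (node, par) :: stack, found =>
      runB imp tree f
        ((((pvNbrs tree node).filter (fun nxt => nxt ≠ par)).map (fun nxt => (nxt, node))) ++ stack)
        (found || decide (node ∈ imp))

def mark_important_alt (cur : Int) (parent : Int) (imp : List Int) (tree : List (Int × List Int)) (need_edges : List (Int × Int)) : Bool :=
  runB imp tree (pvFuel tree) [(cur, parent)] false

-- ===== PRECONDITION & SPEC =====
-- A "frame" (u, v) is a visit of node v entered from node u; Python's recursion explores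
-- exactly the backtrack-free walks from the root frame (parent, cur).
def pvE (tree : List (Int × List Int)) : Nat := (tree.map (fun p => p.2.length)).sum
def pvAddNew {α : Type} [DecidableEq α] (acc : List α) (cs : List α) : List α :=
  cs.foldl (fun a c => if c ∈ a then a else a ++ [c]) acc
def pvFrameSucc (tree : List (Int × List Int)) (fr : Int × Int) : List (Int × Int) :=
  ((pvNbrs tree fr.2).filter (fun w => w ≠ fr.1)).map (fun w => (fr.2, w))
-- closure of a frame set under successor frames (pvE tree + 2 rounds suffice: there are at
-- most pvE tree + 1 distinct frames)
def pvCloseF (tree : List (Int × List Int)) (init : List (Int × Int)) : List (Int × Int) :=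
  (fun S => S.foldl (fun a fr => pvAddNew a (pvFrameSucc tree fr)) S)^[pvE tree + 2] init

-- Pre_ says exactly that the Python A terminates: every node visited along a backtrack-free
-- walk from cur is a key of the dict (else tree[...] raises KeyError), and no visited frame
-- lies on a backtrack-free cycle (else the recursion never ends / raises RecursionError).
def Pre_mark_important (cur : Int) (parent : Int) (imp : List Int) (tree : List (Int × List Int)) (need_edges : List (Int × Int)) : Prop :=
  (∀ fr ∈ pvCloseF tree [(parent, cur)], fr.2 ∈ tree.map Prod.fst) ∧
  (∀ fr ∈ pvCloseF tree [(parent, cur)], fr ∉ pvCloseF tree (pvFrameSucc tree fr))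
instance (cur : Int) (parent : Int) (imp : List Int) (tree : List (Int × List Int)) (need_edges : List (Int × Int)) : Decidable (Pre_mark_important cur parent imp tree need_edges) := by unfold Pre_mark_important; infer_instance

def pvWitness_mark_important : Int × Int × List Int × (List (Int × List Int)) × (List (Int × Int)) :=
  (1, 0, [3], [(1, [2, 3]), (2, [1]), (3, [1])], [])

def Spec_mark_important (cur : Int) (parent : Int) (imp : List Int) (tree : List (Int × List Int)) (need_edges : List (Int × Int)) (out : Bool) : Prop := out = mark_important_alt cur parent imp tree need_edges
instance (cur : Int) (parent : Int) (imp : List Int) (tree : List (Int × List Int)) (need_edges : List (Int × Int)) (out : Bool) : Decidable (Spec_mark_important cur parent imp tree need_edges out) := by unfold Spec_mark_important; infer_instance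

-- ===== CLAIM (what is proved, stated in full; the proofs are below) =====
def Claim_equal_mark_important : Prop := ∀ (cur : Int) (parent : Int) (imp : List Int) (tree : List (Int × List Int)) (need_edges : List (Int × Int)), Dom_mark_important cur parent imp tree need_edges → Pre_mark_important cur parent imp tree need_edges → Spec_mark_important cur parent imp tree need_edges (mark_important cur parent imp tree need_edges)

-- ===== LEMMAS AND PROOFS =====

theorem runB_nil (imp : List Int) (tree : List (Int × List Int)) (f : Nat) (acc : Bool) :
    runB imp tree f [] acc = acc := by
  cases f <;> rfl

-- cond b true posb = posb || b, the shape A's posb update takes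
theorem if_true_else_or (b posb : Bool) : (if b then true else posb) = (posb || b) := by
  cases b <;> cases posb <;> rfl

theorem goAList_fuel_le (imp : List Int) (tree : List (Int × List Int)) :
    ∀ (f : Nat) (lst : List Int) (cur parent : Int) (posb : Bool),
      (goAList imp tree f lst cur parent posb).2 ≤ f := by
  intro f lst
  induction lst generalizing f with
  | nil => intro cur parent posb; simp [goAList]
  | cons nxt rest ih =>
      intro cur parent posb
      by_cases h : nxt = parent
      · simp only [goAList, h, ne_eq, not_true_eq_false, if_false]
        exact ih f cur parent posb
      · simp only [goAList, ne_eq, h, not_false_eq_true, if_true, if_true_else_or]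
        split_ifs with hf
        · exact le_trans (ih _ cur parent _) hf
        · exact ih f cur parent _

theorem goA_fuel_le (imp : List Int) (tree : List (Int × List Int)) :
    ∀ (f : Nat) (cur parent : Int), (goA imp tree f cur parent).2 ≤ f := by
  intro f cur parent
  cases f with
  | zero => simp [goA]
  | succ g =>
      simp only [goA]
      exact le_trans (goAList_fuel_le imp tree g _ cur parent _) (Nat.le_succ g)

theorem goAList_zero (imp : List Int) (tree : List (Int × List Int)) :
    ∀ (lst : List Int) (cur parent : Int) (posb : Bool),
      goAList imp tree 0 lst cur parent posb = (posb, 0) := by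
  intro lst
  induction lst with
  | nil => intro cur parent posb; simp [goAList]
  | cons nxt rest ih =>
      intro cur parent posb
      by_cases h : nxt = parent
      · simp only [goAList, h, ne_eq, not_true_eq_false, if_false]
        exact ih cur parent posb
      · simp only [goAList, ne_eq, h, not_false_eq_true, if_true, goA, le_refl, dif_pos]
        exact ih cur parent posb

-- The bisimulation: running B's stack machine over the pushed child frames of one A-level
-- equals finishing that level's fold in A and continuing with the leftover fuel. Fuel is
-- consumed identically on the two sides (one unit per call entered = per frame popped), so
-- this holds for EVERY input and every fuel value — no tree shape assumption is needed for
-- the return-value equivalence.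
theorem bisim (imp : List Int) (tree : List (Int × List Int)) :
    ∀ (f : Nat) (lst : List Int) (cur parent : Int) (posb acc : Bool) (st : List (Int × Int)),
      runB imp tree f (((lst.filter (fun nxt => nxt ≠ parent)).map (fun nxt => (nxt, cur))) ++ st) (acc || posb)
        = runB imp tree (goAList imp tree f lst cur parent posb).2 st (acc || (goAList imp tree f lst cur parent posb).1) := by
  intro f
  induction f using Nat.strong_induction_on with
  | _ f IHf =>
    intro lst
    induction lst with
    | nil => intro cur parent posb acc st; simp [goAList]
    | cons nxt rest IHl =>
      intro cur parent posb acc st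
      by_cases h : nxt = parent
      · -- skipped child: same fuel, shorter list (inner induction hypothesis)
        have hfilt : (nxt :: rest).filter (fun c => decide (c ≠ parent))
            = rest.filter (fun c => decide (c ≠ parent)) := by
          simp [h]
        have hgo : goAList imp tree f (nxt :: rest) cur parent posb
            = goAList imp tree f rest cur parent posb := by
          simp only [goAList, h, ne_eq, not_true_eq_false, if_false]
        rw [hfilt, hgo]
        exact IHl cur parent posb acc st
      · have hfilt : (nxt :: rest).filter (fun c => decide (c ≠ parent))
            = nxt :: rest.filter (fun c => decide (c ≠ parent)) := by
          simp [h]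
        rw [hfilt, List.map_cons, List.cons_append]
        cases f with
        | zero =>
            rw [goAList_zero]
            rfl
        | succ g =>
            -- pop the frame (nxt, cur): one fuel unit, acc picks up nxt ∈ imp
            have hpop : runB imp tree (g+1)
                ((nxt, cur) :: (((rest.filter (fun c => decide (c ≠ parent))).map (fun c => (c, cur))) ++ st))
                (acc || posb)
              = runB imp tree g
                ((((pvNbrs tree nxt).filter (fun c => decide (c ≠ cur))).map (fun c => (c, nxt)))
                  ++ ((((rest.filter (fun c => decide (c ≠ parent))).map (fun c => (c, cur)))) ++ st))
                ((acc || posb) || decide (nxt ∈ imp)) := rfl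
            rw [hpop]
            -- descend into the child's subtree (outer IH at fuel g)
            rw [IHf g (Nat.lt_succ_self g) (pvNbrs tree nxt) nxt cur (decide (nxt ∈ imp))
              (acc || posb) ((((rest.filter (fun c => decide (c ≠ parent))).map (fun c => (c, cur)))) ++ st)]
            have hA : goAList imp tree g (pvNbrs tree nxt) nxt cur (decide (nxt ∈ imp))
                = goA imp tree (g+1) nxt cur := by
              simp only [goA]
            rw [hA]
            have hle : (goA imp tree (g+1) nxt cur).2 ≤ g := by
              rw [← hA]; exact goAList_fuel_le imp tree g _ nxt cur _
            have hor : ((acc || posb) || (goA imp tree (g+1) nxt cur).1)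
                = (acc || (posb || (goA imp tree (g+1) nxt cur).1)) := by
              cases acc <;> cases posb <;> cases (goA imp tree (g+1) nxt cur).1 <;> rfl
            rw [hor]
            -- continue with the remaining siblings (outer IH at the leftover fuel)
            rw [IHf (goA imp tree (g+1) nxt cur).2 (Nat.lt_succ_of_le hle) rest cur parent
              (posb || (goA imp tree (g+1) nxt cur).1) acc st]
            -- fold the RHS back into goAList (g+1) (nxt :: rest)
            have hgo : goAList imp tree (g+1) (nxt :: rest) cur parent posb
                = goAList imp tree (goA imp tree (g+1) nxt cur).2 rest cur parent
                    (posb || (goA imp tree (g+1) nxt cur).1) := by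
              simp only [goAList, ne_eq, h, not_false_eq_true, if_true,
                dif_pos (goA_fuel_le imp tree (g+1) nxt cur), if_true_else_or]
            rw [hgo]

-- ===== VERDICT (by name: the statement is the Claim_ definition above) =====
theorem mark_important_spec : Claim_equal_mark_important := by
  intro cur parent imp tree need_edges _ _
  show mark_important cur parent imp tree need_edges
      = mark_important_alt cur parent imp tree need_edges
  unfold mark_important mark_important_alt
  obtain ⟨m, hm⟩ : ∃ m, pvFuel tree = m + 1 :=
    ⟨pvFuel tree - 1, (Nat.succ_pred_eq_of_pos (by unfold pvFuel; exact Nat.two_pow_pos _)).symm⟩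
  rw [hm]
  have h0 : runB imp tree (m + 1) [(cur, parent)] false
      = runB imp tree m
        ((((pvNbrs tree cur).filter (fun nxt => nxt ≠ parent)).map (fun nxt => (nxt, cur))) ++ [])
        (false || decide (cur ∈ imp)) := rfl
  rw [h0, bisim imp tree m (pvNbrs tree cur) cur parent (decide (cur ∈ imp)) false [],
    runB_nil]
  simp only [goA, Bool.false_or]
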